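-- pv_equiv track=rewrite | github.com/Lumina-Analytics/rclt | data_preparation/4_deduplicate.py | deduplicate_lines_reverse
-- ===== SOURCE A (Python) =====
-- def deduplicate_lines_reverse(lines: dict):
--     '''DEDUPLICATES FILE BASED ON TO LANGUAGE AND SHORTEST LENGTH FROM LANGUAGE'''
--     lines_dict = {}
--
--     for key,value in lines.items():
--         from_lang = key
--         to_lang = value
--         from_lang_len = len(from_lang)
--
--         if to_lang not in lines_dict.keys():
--             lines_dict[to_lang] = from_lang
--         else:
--             current_translation_length = len(lines_dict[to_lang])
--             if(current_translation_length >= from_lang_len):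
--                 lines_dict[to_lang] = from_lang
--
--     return lines_dict
-- ===== SOURCE B (Python) =====
-- def deduplicate_lines_reverse(lines: dict):
--     '''DEDUPLICATES FILE BASED ON TO LANGUAGE AND SHORTEST LENGTH FROM LANGUAGE'''
--     groups = {}
--     for from_lang, to_lang in lines.items():
--         groups.setdefault(to_lang, []).append(from_lang)
--     # last occurrence of the minimal length wins, hence min over the reversed group
--     return {to_lang: min(reversed(group), key=len) for to_lang, group in groups.items()}
-- ===== Notes on version B (the rewrite author's own statement) =====
-- stated objective: alternative
-- what changed: Replaces the incremental best-so-far dict update with a two-phase group-then-select: one pass groups from_langs by to_lang, a second pass picks min(reversed(group), key=len) per group.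
import Mathlib
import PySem

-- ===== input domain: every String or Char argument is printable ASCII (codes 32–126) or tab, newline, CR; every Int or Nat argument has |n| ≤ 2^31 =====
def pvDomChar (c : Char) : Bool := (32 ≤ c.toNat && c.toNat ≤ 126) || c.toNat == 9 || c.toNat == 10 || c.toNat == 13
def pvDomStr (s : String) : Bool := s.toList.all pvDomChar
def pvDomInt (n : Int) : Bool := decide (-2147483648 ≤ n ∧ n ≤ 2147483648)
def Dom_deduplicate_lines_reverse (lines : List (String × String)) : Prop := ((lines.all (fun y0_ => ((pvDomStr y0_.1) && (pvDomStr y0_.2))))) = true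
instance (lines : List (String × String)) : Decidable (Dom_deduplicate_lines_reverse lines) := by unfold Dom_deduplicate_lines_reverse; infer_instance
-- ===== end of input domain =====

-- B replaces A's incremental best-so-far dict update with a two-phase group-then-select
-- (group from_langs by to_lang, then pick min(reversed(group), key=len) per group): alternative decomposition, same cost.


-- ===== PORT A =====
def deduplicate_lines_reverse (lines : List (String × String)) : List (String × String) :=
  (lines.foldl (fun lines_dict kv =>
      let from_lang := kv.1
      let to_lang := kv.2
      let from_lang_len := PySem.Str.len from_lang
      if lines_dict.contains to_lang = false then
        lines_dict.insert to_lang from_lang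
      else
        -- 'lines_dict[to_lang]': the key is present in this branch, so the "" default is dead
        let current_translation_length := PySem.Str.len (lines_dict.getD to_lang "")
        if current_translation_length ≥ from_lang_len then
          lines_dict.insert to_lang from_lang
        else lines_dict)
    PySem.Dict.empty).items

-- ===== PORT B =====
-- min(reversed(group), key=len); groups are never empty, so the "" branch is dead
def dedupSel (g : List String) : String :=
  match PySem.List.min? g.reverse PySem.Str.len with
  | some m => m
  | none => ""

def deduplicate_lines_reverse_alt (lines : List (String × String)) : List (String × String) :=
  let groups := lines.foldl (fun d kv => d.modify kv.2 [] (fun g => g ++ [kv.1])) PySem.Dict.empty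
  groups.items.map (fun q => (q.1, dedupSel q.2))

-- ===== PRECONDITION & SPEC =====
def Spec_deduplicate_lines_reverse (lines : List (String × String)) (out : List (String × String)) : Prop := out = deduplicate_lines_reverse_alt lines
instance (lines : List (String × String)) (out : List (String × String)) : Decidable (Spec_deduplicate_lines_reverse lines out) := by unfold Spec_deduplicate_lines_reverse; infer_instance

-- ===== CLAIM (what is proved, stated in full; the proofs are below) =====
def Claim_equal_deduplicate_lines_reverse : Prop := ∀ (lines : List (String × String)), Dom_deduplicate_lines_reverse lines → Spec_deduplicate_lines_reverse lines (deduplicate_lines_reverse lines)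

-- ===== LEMMAS AND PROOFS =====

-- the step function of min?'s internal fold, named so it can be reasoned about
def minStep (acc : Option String) (y : String) : Option String :=
  match acc with
  | none => some y
  | some m => if PySem.Str.len y < PySem.Str.len m then some y else some m

theorem min?_eq_foldl (t : List String) :
    PySem.List.min? t PySem.Str.len = t.foldl minStep none := by
  unfold PySem.List.min?
  congr 1
  funext a x
  cases a <;> rfl

-- min?'s fold from a `some` start, characterised by the fold from `none`
theorem foldMin_char (t : List String) (x : String) :
    t.foldl minStep (some x) =
    some (match t.foldl minStep none with
          | none => x
          | some m => if PySem.Str.len m < PySem.Str.len x then m else x) := by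
  induction t generalizing x with
  | nil => rfl
  | cons y t ih =>
    simp only [List.foldl_cons]
    have hstep : minStep none y = some y := rfl
    rw [hstep, ih y]
    by_cases hxy : PySem.Str.len y < PySem.Str.len x <;>
      simp only [minStep, hxy, if_pos, if_neg, not_false_iff] <;>
      rw [ih] <;>
      cases h : t.foldl minStep none <;>
      simp only [h] <;>
      split_ifs <;>
      first
        | rfl
        | (exfalso; unfold PySem.Str.len at *; omega)

theorem foldl_minStep_isSome (g : List String) (hg : g ≠ []) :
    ∃ m, g.foldl minStep none = some m := by
  cases g with
  | nil => exact absurd rfl hg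
  | cons z t =>
    simp only [List.foldl_cons]
    have hstep : minStep none z = some z := rfl
    rw [hstep, foldMin_char]
    exact ⟨_, rfl⟩

-- appending one element to a nonempty group updates the selection exactly like A's running update
theorem dedupSel_append (g : List String) (f : String) (hg : g ≠ []) :
    dedupSel (g ++ [f]) =
      if PySem.Str.len (dedupSel g) ≥ PySem.Str.len f then f else dedupSel g := by
  have hgr : g.reverse ≠ [] := by simpa using hg
  obtain ⟨m, hm⟩ := foldl_minStep_isSome g.reverse hgr
  have hsel : dedupSel g = m := by
    unfold dedupSel
    rw [min?_eq_foldl, hm]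
  have hrev : (g ++ [f]).reverse = f :: g.reverse := by simp
  have hsel2 : dedupSel (g ++ [f]) =
      if PySem.Str.len m < PySem.Str.len f then m else f := by
    unfold dedupSel
    rw [min?_eq_foldl, hrev, List.foldl_cons]
    have hstep : minStep none f = some f := rfl
    rw [hstep, foldMin_char, hm]
  rw [hsel2, hsel]
  split_ifs <;> first | rfl | (exfalso; omega)

-- apply dedupSel to every group value
def mapSel (d : PySem.Dict String (List String)) : PySem.Dict String String :=
  PySem.Dict.mk (d.items.map (fun q => (q.1, dedupSel q.2)))

theorem get?_mapSel (d : PySem.Dict String (List String)) (k : String) :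
    (mapSel d).get? k = (d.get? k).map dedupSel := by
  unfold mapSel PySem.Dict.get?
  simp only [List.find?_map]
  cases h : List.find? (fun p => p.1 == k) d.items with
  | none =>
    have : List.find? ((fun p => p.1 == k) ∘ (fun q => (q.1, dedupSel q.2))) d.items = none := by
      rw [← h]; rfl
    simp [this]
  | some q =>
    have : List.find? ((fun p => p.1 == k) ∘ (fun q => (q.1, dedupSel q.2))) d.items = some q := by
      rw [← h]; rfl
    simp [this]

theorem contains_mapSel (d : PySem.Dict String (List String)) (k : String) :
    (mapSel d).contains k = d.contains k := by
  unfold mapSel PySem.Dict.contains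
  simp only [List.any_map]
  congr 1

theorem items_mapSel (d : PySem.Dict String (List String)) :
    (mapSel d).items = d.items.map (fun q => (q.1, dedupSel q.2)) := rfl

-- one loop step commutes: A's update on the selected dict = select after B's grouping update
theorem step_comm (d : PySem.Dict String (List String)) (hnd : d.keys.Nodup)
    (hne : ∀ p ∈ d.items, p.2 ≠ []) (kv : String × String) :
    (if (mapSel d).contains kv.2 = false then
        (mapSel d).insert kv.2 kv.1
      else
        if PySem.Str.len ((mapSel d).getD kv.2 "") ≥ PySem.Str.len kv.1 then
          (mapSel d).insert kv.2 kv.1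
        else mapSel d) =
    mapSel (d.modify kv.2 [] (fun g => g ++ [kv.1])) := by
  unfold PySem.Dict.modify
  by_cases hc : d.contains kv.2
  · -- key already grouped
    obtain ⟨g, hg⟩ : ∃ g, d.get? kv.2 = some g := by
      have := PySem.Dict.contains_eq_isSome_get? d kv.2
      rw [hc] at this
      cases h : d.get? kv.2 with
      | none => rw [h] at this; simp at this
      | some g => exact ⟨g, rfl⟩
    have hgne : g ≠ [] := hne _ (PySem.Dict.mem_items_of_get?_eq_some d hg)
    have hgd : d.getD kv.2 [] = g := by rw [PySem.Dict.getD_eq_get?_getD, hg]; rfl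
    have hcs : (mapSel d).contains kv.2 = true := by rw [contains_mapSel]; exact hc
    have hcur : (mapSel d).getD kv.2 "" = dedupSel g := by
      rw [PySem.Dict.getD_eq_get?_getD, get?_mapSel, hg]; rfl
    have hval : ∀ q ∈ d.items, q.1 = kv.2 → q.2 = g := by
      intro q hq hk
      have := PySem.Dict.get?_of_mem_items d (k := q.1) (v := q.2) hq hnd
      rw [hk, hg] at this
      exact (Option.some_injective _ this).symm
    rw [hgd, hcs, hcur]
    simp only [Bool.true_eq_false, reduceIte]
    by_cases hlen : PySem.Str.len (dedupSel g) ≥ PySem.Str.len kv.1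
    · rw [if_pos hlen]
      apply PySem.Dict.ext
      rw [PySem.Dict.items_insert_of_contains _ _ hcs, items_mapSel, items_mapSel,
          PySem.Dict.items_insert_of_contains _ _ hc]
      simp only [List.map_map]
      apply List.map_congr_left
      intro q hq
      by_cases hk : q.1 = kv.2
      · simp only [Function.comp, hk, beq_self_eq_true, if_pos]
        have : dedupSel (g ++ [kv.1]) = kv.1 := by rw [dedupSel_append g kv.1 hgne, if_pos hlen]
        simp [this]
      · simp [Function.comp, hk]
    · rw [if_neg hlen]
      apply PySem.Dict.ext
      rw [items_mapSel, items_mapSel, PySem.Dict.items_insert_of_contains _ _ hc]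
      simp only [List.map_map]
      symm
      apply List.map_congr_left
      intro q hq
      by_cases hk : q.1 = kv.2
      · have hq2 : q.2 = g := hval q hq hk
        have : dedupSel (g ++ [kv.1]) = dedupSel g := by rw [dedupSel_append g kv.1 hgne, if_neg hlen]
        simp [Function.comp, hk, this, hq2]
      · simp [Function.comp, hk]
  · -- fresh key
    have hcb : d.contains kv.2 = false := by simpa using hc
    have hcs : (mapSel d).contains kv.2 = false := by rw [contains_mapSel]; exact hcb
    have hgd : d.getD kv.2 [] = [] := by
      rw [PySem.Dict.getD_eq_get?_getD]
      have := PySem.Dict.get?_eq_none_iff_contains (d := d) (k := kv.2)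
      rw [this.mpr hcb]
      rfl
    rw [hcs, hgd]
    simp only [if_pos]
    apply PySem.Dict.ext
    rw [PySem.Dict.items_insert_of_not_contains _ _ hcs, items_mapSel, items_mapSel,
        PySem.Dict.items_insert_of_not_contains _ _ hcb]
    simp [dedupSel, PySem.List.min?]

-- loop invariant: running A's loop on the selected dict = selecting after B's grouping loop
theorem main_inv (lines : List (String × String)) :
    ∀ (d : PySem.Dict String (List String)), d.keys.Nodup → (∀ p ∈ d.items, p.2 ≠ []) →
    lines.foldl (fun lines_dict kv =>
      if lines_dict.contains kv.2 = false then
        lines_dict.insert kv.2 kv.1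
      else
        if PySem.Str.len (lines_dict.getD kv.2 "") ≥ PySem.Str.len kv.1 then
          lines_dict.insert kv.2 kv.1
        else lines_dict) (mapSel d) =
    mapSel (lines.foldl (fun d kv => d.modify kv.2 [] (fun g => g ++ [kv.1])) d) := by
  induction lines with
  | nil => intro d _ _; rfl
  | cons kv rest ih =>
    intro d hnd hne
    simp only [List.foldl_cons]
    rw [step_comm d hnd hne kv]
    apply ih
    · unfold PySem.Dict.modify
      exact PySem.Dict.nodup_keys_insert _ _ _ hnd
    · intro p hp
      unfold PySem.Dict.modify at hp
      rw [PySem.Dict.mem_items_insert] at hp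
      rcases hp with h | ⟨h, _⟩
      · rw [h]; simp
      · exact hne _ h

-- ===== VERDICT (by name: the statement is the Claim_ definition above) =====
theorem deduplicate_lines_reverse_spec : Claim_equal_deduplicate_lines_reverse := by
  intro lines _
  unfold Spec_deduplicate_lines_reverse deduplicate_lines_reverse deduplicate_lines_reverse_alt
  have h := main_inv lines PySem.Dict.empty (by simp [PySem.Dict.keys, PySem.Dict.empty]) (by simp [PySem.Dict.empty])
  have he : mapSel PySem.Dict.empty = PySem.Dict.empty := rfl
  rw [he] at h
  simp only [h, mapSel]
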